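-- pv_equiv track=rewrite | github.com/chaoticJester/CS_01418112 | elab/Lab-13PB/06.py | rando
-- ===== SOURCE A (Python) =====
-- def rando(ls):
--     ls_copy = ls
--     inc = 0
--     dec = 0
--     for i in range(len(ls_copy)-1):
--         if ls_copy[i] > ls_copy[i+1]:
--             dec += 1
--         if ls_copy[i] < ls_copy[i+1]:
--             inc += 1
--     if inc and dec:
--         return True
--     else:
--         return False
-- ===== SOURCE B (Python) =====
-- def rando(ls):
--     return ls != sorted(ls) and ls != sorted(ls, reverse=True)
-- ===== Notes on version B (the rewrite author's own statement) =====
-- stated objective: alternative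
-- what changed: Replaces the adjacent-pair counting loop with a sort-based characterisation: the list has both a rise and a fall iff it equals neither sorted(ls) nor sorted(ls, reverse=True).
import Mathlib
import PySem

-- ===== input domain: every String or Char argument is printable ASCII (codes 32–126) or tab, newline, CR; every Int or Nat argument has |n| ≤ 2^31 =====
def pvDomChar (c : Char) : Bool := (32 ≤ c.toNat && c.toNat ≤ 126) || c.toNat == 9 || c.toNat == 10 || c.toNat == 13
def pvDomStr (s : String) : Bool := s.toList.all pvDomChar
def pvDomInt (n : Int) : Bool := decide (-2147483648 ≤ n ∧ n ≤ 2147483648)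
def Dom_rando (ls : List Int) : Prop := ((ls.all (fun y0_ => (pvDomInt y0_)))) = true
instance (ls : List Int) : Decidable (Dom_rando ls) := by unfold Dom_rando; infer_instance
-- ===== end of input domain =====

-- B replaces the adjacent-pair counting loop with a sort-based characterisation:
-- a rise and a fall both exist iff ls equals neither sorted(ls) nor sorted(ls, reverse=True).

-- ===== PORT A =====
def rando (ls : List Int) : Bool :=
  let s :=
    (PySem.List.pyRange 0 ((ls.length : Int) - 1) 1).foldl
      (fun (p : Int × Int) i =>
        let p1 := if PySem.List.pyGetD ls i 0 > PySem.List.pyGetD ls (i + 1) 0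
                  then (p.1, p.2 + 1) else p
        if PySem.List.pyGetD ls i 0 < PySem.List.pyGetD ls (i + 1) 0
        then (p1.1 + 1, p1.2) else p1)
      (0, 0)
  if s.1 ≠ 0 ∧ s.2 ≠ 0 then true else false

-- ===== PORT B =====
def rando_alt (ls : List Int) : Bool :=
  decide (ls ≠ PySem.List.sorted ls (fun x => x) false) &&
  decide (ls ≠ PySem.List.sorted ls (fun x => x) true)

-- ===== PRECONDITION & SPEC =====
def Spec_rando (ls : List Int) (out : Bool) : Prop := out = rando_alt ls
instance (ls : List Int) (out : Bool) : Decidable (Spec_rando ls out) := by unfold Spec_rando; infer_instance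

-- ===== CLAIM (what is proved, stated in full; the proofs are below) =====
def Claim_equal_rando : Prop := ∀ (ls : List Int), Dom_rando ls → Spec_rando ls (rando ls)

-- ===== LEMMAS AND PROOFS =====

-- Index loop over adjacent positions = structural fold over the zip of the list with its tail.
theorem adj_fold {σ : Type} (g : σ → Int → Int → σ) :
    ∀ (ls : List Int) (init : σ),
    (List.range (ls.length - 1)).foldl
        (fun s k => g s (ls.getD k 0) (ls.getD (k + 1) 0)) init
      = (ls.zip ls.tail).foldl (fun s p => g s p.1 p.2) init := by
  intro ls
  induction ls with
  | nil => intro init; simp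
  | cons x t ih =>
    intro init
    cases t with
    | nil => simp
    | cons y t' =>
      simp only [List.length_cons, Nat.add_sub_cancel, List.range_succ_eq_map,
        List.foldl_cons, List.foldl_map, List.zip_cons_cons, List.tail_cons]
      have := ih (g init x y)
      simp only [List.length_cons, Nat.add_sub_cancel, List.tail_cons] at this
      simpa using this

-- The counting fold returns the two adjacent-pair counts.
theorem count_fold (ps : List (Int × Int)) :
    ∀ init : Int × Int,
    ps.foldl
        (fun (p : Int × Int) q =>
          if q.1 < q.2 then
            ((if q.1 > q.2 then (p.1, p.2 + 1) else p).1 + 1,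
             (if q.1 > q.2 then (p.1, p.2 + 1) else p).2)
          else if q.1 > q.2 then (p.1, p.2 + 1) else p) init
      = (init.1 + (ps.countP (fun q => decide (q.1 < q.2)) : Int),
         init.2 + (ps.countP (fun q => decide (q.1 > q.2)) : Int)) := by
  induction ps with
  | nil => intro init; simp
  | cons q t ih =>
    intro init
    simp only [List.foldl_cons, List.countP_cons, ih]
    rcases lt_trichotomy q.1 q.2 with h | h | h <;>
      simp [h, not_lt_of_gt, ne_of_lt, Prod.ext_iff] <;> omega

-- Every adjacent pair satisfies a transitive r iff the whole list is r-pairwise.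
theorem zip_tail_forall_iff_pairwise (r : Int → Int → Prop)
    (htr : ∀ a b c, r a b → r b c → r a c) :
    ∀ ls : List Int, (∀ p ∈ ls.zip ls.tail, r p.1 p.2) ↔ ls.Pairwise r := by
  intro ls
  induction ls with
  | nil => simp
  | cons x t ih =>
    cases t with
    | nil => simp
    | cons y t' =>
      simp only [List.tail_cons, List.zip_cons_cons, List.mem_cons,
        List.pairwise_cons] at *
      constructor
      · intro h
        have hxy : r x y := h (x, y) (Or.inl rfl)
        have hrest := ih.mp (fun p hp => h p (Or.inr hp))
        refine ⟨?_, hrest⟩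
        intro z hz
        rcases hz with rfl | hz
        · exact hxy
        · exact htr _ _ _ hxy (hrest.1 z hz)
      · rintro ⟨h1, h2, h3⟩ p hp
        rcases hp with rfl | hp
        · exact h1 y (Or.inl rfl)
        · exact ih.mpr ⟨h2, h3⟩ p hp

-- No falling adjacent pair iff ls is its own (stable) ascending sort.
theorem no_dec_iff_sorted (ls : List Int) :
    (ls.zip ls.tail).countP (fun q => decide (q.1 > q.2)) = 0 ↔
      ls = PySem.List.sorted ls (fun x => x) false := by
  rw [List.countP_eq_zero]
  constructor
  · intro h
    have hp : ls.Pairwise (fun a b : Int => a ≤ b) := by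
      rw [← zip_tail_forall_iff_pairwise (fun a b : Int => a ≤ b) (fun a b c h1 h2 => le_trans h1 h2)]
      intro p hp
      have := h p hp
      simp only [decide_eq_true_eq] at this
      omega
    exact (PySem.List.sorted_eq_self_of_pairwise ls (fun x : Int => x) hp).symm
  · intro h p hp
    have hpw : (PySem.List.sorted ls (fun x : Int => x) false).Pairwise
        (fun a b : Int => a ≤ b) := PySem.List.sorted_pairwise ls _
    rw [← h] at hpw
    have := (zip_tail_forall_iff_pairwise (fun a b : Int => a ≤ b)
      (fun a b c h1 h2 => le_trans h1 h2) ls).mpr hpw p hp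
    simp only [decide_eq_true_eq]
    omega

-- No rising adjacent pair iff ls is its own (stable) descending sort.
theorem no_inc_iff_sorted_rev (ls : List Int) :
    (ls.zip ls.tail).countP (fun q => decide (q.1 < q.2)) = 0 ↔
      ls = PySem.List.sorted ls (fun x => x) true := by
  rw [List.countP_eq_zero]
  constructor
  · intro h
    have hp : ls.Pairwise (fun a b : Int => b ≤ a) := by
      rw [← zip_tail_forall_iff_pairwise (fun a b : Int => b ≤ a) (fun a b c h1 h2 => le_trans h2 h1)]
      intro p hp
      have := h p hp
      simp only [decide_eq_true_eq] at this
      omega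
    exact (PySem.List.sorted_rev_eq_self_of_pairwise ls (fun x : Int => x) hp).symm
  · intro h p hp
    have hpw : (PySem.List.sorted ls (fun x : Int => x) true).Pairwise
        (fun a b : Int => b ≤ a) := PySem.List.sorted_pairwise_rev ls _
    rw [← h] at hpw
    have := (zip_tail_forall_iff_pairwise (fun a b : Int => b ≤ a)
      (fun a b c h1 h2 => le_trans h2 h1) ls).mpr hpw p hp
    simp only [decide_eq_true_eq]
    omega

-- ===== VERDICT (by name: the statement is the Claim_ definition above) =====
theorem rando_spec : Claim_equal_rando := by
  intro ls _
  show rando ls = rando_alt ls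
  unfold rando rando_alt
  have hcast : ∀ (k : Nat),
      PySem.List.pyGetD ls ((k : Int)) 0 = ls.getD k 0 := fun k =>
    PySem.List.pyGetD_natCast ls k 0
  have hcast1 : ∀ (k : Nat),
      PySem.List.pyGetD ls ((k : Int) + 1) 0 = ls.getD (k + 1) 0 := by
    intro k
    have h : ((k : Int) + 1) = ((k + 1 : Nat) : Int) := by push_cast; ring
    rw [h, PySem.List.pyGetD_natCast]
  have hlen : ((ls.length : Int) - 1 - 0).toNat = ls.length - 1 := by omega
  simp only [PySem.List.pyRange_one, List.foldl_map, zero_add, hcast, hcast1, hlen]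
  rw [adj_fold (fun (p : Int × Int) a b =>
      if a < b then
        ((if a > b then (p.1, p.2 + 1) else p).1 + 1,
         (if a > b then (p.1, p.2 + 1) else p).2)
      else if a > b then (p.1, p.2 + 1) else p) ls (0, 0),
    count_fold]
  simp only [zero_add]
  have d1 : decide (ls ≠ PySem.List.sorted ls (fun x => x) false)
      = decide (((ls.zip ls.tail).countP (fun q => decide (q.1 > q.2)) : Int) ≠ 0) := by
    apply decide_eq_decide.mpr
    rw [not_iff_not, Int.natCast_eq_zero]
    exact (no_dec_iff_sorted ls).symm
  have d2 : decide (ls ≠ PySem.List.sorted ls (fun x => x) true)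
      = decide (((ls.zip ls.tail).countP (fun q => decide (q.1 < q.2)) : Int) ≠ 0) := by
    apply decide_eq_decide.mpr
    rw [not_iff_not, Int.natCast_eq_zero]
    exact (no_inc_iff_sorted_rev ls).symm
  rw [d1, d2]
  by_cases h1 : ((ls.zip ls.tail).countP (fun q => decide (q.1 < q.2)) : Int) = 0 <;>
    by_cases h2 : ((ls.zip ls.tail).countP (fun q => decide (q.1 > q.2)) : Int) = 0 <;>
      simp [h1, h2, Bool.and_comm]
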